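-- pv_equiv track=rewrite | github.com/AvivBra/Bid-Opt-App-Aug-17-2025 | config/optimization_config.py | get_helper_column_position
-- ===== SOURCE A (Python) =====
-- from typing import Dict, List, Any, Optional
--
-- BID_COLUMN_NAME = "Bid"
--
-- def get_helper_column_position(original_columns: List[str]) -> int:
--     """
--     Get the position where helper columns should be inserted.
--     Helper columns ALWAYS go immediately BEFORE the Bid column.
--
--     Args:
--         original_columns: List of original column names
--
--     Returns:
--         Index position for helper column insertion
--     """
--     try:
--         # Find Bid column position
--         bid_index = original_columns.index(BID_COLUMN_NAME)
--         return bid_index  # Insert before Bid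
--     except ValueError:
--         # If Bid not found, try alternative names
--         for alt_name in ["Max CPC", "Max Bid", "Default Bid"]:
--             try:
--                 return original_columns.index(alt_name)
--             except ValueError:
--                 continue
--         # Default to position 10 if no bid column found
--         return 10
-- ===== SOURCE B (Python) =====
-- _RANK = {"Bid": 0, "Max CPC": 1, "Max Bid": 2, "Default Bid": 3}
--
-- def get_helper_column_position(original_columns):
--     # Single right-to-left scan keeping the best (rank, index) of the suffix;
--     # '<=' lets an equal-rank column further left take over, so the first
--     # occurrence of the highest-priority name wins.
--     best = None
--     for i in range(len(original_columns) - 1, -1, -1):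
--         r = _RANK.get(original_columns[i])
--         if r is not None and (best is None or r <= best[0]):
--             best = (r, i)
--     return 10 if best is None else best[1]
-- ===== Notes on version B (the rewrite author's own statement) =====
-- stated objective: alternative
-- what changed: B makes one right-to-left pass keeping an argmin accumulator (rank, index) over the suffix, preferring lower rank and (via <=) earlier index, instead of A's up-to-four separate forward .index scans with try/except in priority order.
import Mathlib
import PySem

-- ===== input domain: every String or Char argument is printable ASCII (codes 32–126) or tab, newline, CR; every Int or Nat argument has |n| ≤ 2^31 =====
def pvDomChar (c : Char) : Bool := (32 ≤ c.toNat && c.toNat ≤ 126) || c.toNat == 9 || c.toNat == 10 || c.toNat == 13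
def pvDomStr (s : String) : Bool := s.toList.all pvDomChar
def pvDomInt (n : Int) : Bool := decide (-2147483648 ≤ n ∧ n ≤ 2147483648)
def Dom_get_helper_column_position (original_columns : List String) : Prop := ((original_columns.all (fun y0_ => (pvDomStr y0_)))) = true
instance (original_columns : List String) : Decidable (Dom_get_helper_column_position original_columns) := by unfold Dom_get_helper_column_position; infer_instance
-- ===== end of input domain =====

-- B replaces A's up-to-four forward .index scans (try/except) by one right-to-left pass
-- with an argmin (rank, index) accumulator; return-value equivalence proved (alternative).


-- ===== PORT A =====
-- try .index("Bid"); on ValueError loop over ["Max CPC","Max Bid","Default Bid"]; else 10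
def get_helper_column_position (original_columns : List String) : Int :=
  match PySem.List.index? original_columns "Bid" with
  | some i => (i : Int)
  | none =>
    match PySem.List.index? original_columns "Max CPC" with
    | some i => (i : Int)
    | none =>
      match PySem.List.index? original_columns "Max Bid" with
      | some i => (i : Int)
      | none =>
        match PySem.List.index? original_columns "Default Bid" with
        | some i => (i : Int)
        | none => 10

-- ===== PORT B =====
-- _RANK = {"Bid": 0, "Max CPC": 1, "Max Bid": 2, "Default Bid": 3}
def pvRankDict : PySem.Dict String Int :=
  PySem.Dict.ofList [("Bid", 0), ("Max CPC", 1), ("Max Bid", 2), ("Default Bid", 3)]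
-- one backward step of the scan: r = _RANK.get(name); accept if best is None or r <= best[0]
def pvStep (p : Int × String) (best : Option (Int × Int)) : Option (Int × Int) :=
  match PySem.Dict.get? pvRankDict p.2 with
  | none => best
  | some r =>
    match best with
    | none => some (r, p.1)
    | some (r0, _) => if r ≤ r0 then some (r, p.1) else best

-- right-to-left loop over (index, name) pairs = foldr of pvStep; return best[1] or 10
def get_helper_column_position_alt (original_columns : List String) : Int :=
  match (PySem.List.enumerate original_columns 0).foldr pvStep none with
  | none => 10
  | some (_, i) => i

-- ===== PRECONDITION & SPEC =====
def Spec_get_helper_column_position (original_columns : List String) (out : Int) : Prop := out = get_helper_column_position_alt original_columns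
instance (original_columns : List String) (out : Int) : Decidable (Spec_get_helper_column_position original_columns out) := by unfold Spec_get_helper_column_position; infer_instance

-- ===== CLAIM (what is proved, stated in full; the proofs are below) =====
def Claim_equal_get_helper_column_position : Prop := ∀ (original_columns : List String), Dom_get_helper_column_position original_columns → Spec_get_helper_column_position original_columns (get_helper_column_position original_columns)

-- ===== LEMMAS AND PROOFS =====

theorem pvRank_eval (x : String) :
    PySem.Dict.get? pvRankDict x =
      if "Bid" = x then some 0 else if "Max CPC" = x then some 1
      else if "Max Bid" = x then some 2 else if "Default Bid" = x then some 3 else none := by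
  have h : pvRankDict = PySem.Dict.mk [("Bid", 0), ("Max CPC", 1), ("Max Bid", 2), ("Default Bid", 3)] := by decide
  rw [h]
  rw [PySem.Dict.get?_mk_cons, PySem.Dict.get?_mk_cons, PySem.Dict.get?_mk_cons, PySem.Dict.get?_mk_cons]
  simp only [beq_iff_eq]
  split_ifs <;> simp [PySem.Dict.get?]

theorem pvScan_char (cols : List String) (s : Int) :
    (PySem.List.enumerate cols s).foldr pvStep none =
      match PySem.List.index? cols "Bid" with
      | some j => some (0, (j : Int) + s)
      | none =>
        match PySem.List.index? cols "Max CPC" with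
        | some j => some (1, (j : Int) + s)
        | none =>
          match PySem.List.index? cols "Max Bid" with
          | some j => some (2, (j : Int) + s)
          | none =>
            match PySem.List.index? cols "Default Bid" with
            | some j => some (3, (j : Int) + s)
            | none => none := by
  induction cols generalizing s with
  | nil => simp [PySem.List.enumerate, PySem.List.index?]
  | cons x xs ih =>
    rw [PySem.List.enumerate_cons]
    simp only [List.foldr_cons]
    rw [ih]
    by_cases h1 : x = "Bid"
    · subst h1
      rw [PySem.List.index?_cons_self]
      cases hb : PySem.List.index? xs "Bid" <;>
        cases hc : PySem.List.index? xs "Max CPC" <;>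
          cases hm : PySem.List.index? xs "Max Bid" <;>
            cases hd : PySem.List.index? xs "Default Bid" <;>
              simp [pvStep, pvRank_eval]
    · by_cases h2 : x = "Max CPC"
      · subst h2
        rw [PySem.List.index?_cons_of_ne _ (by decide), PySem.List.index?_cons_self]
        cases hb : PySem.List.index? xs "Bid" <;>
          cases hc : PySem.List.index? xs "Max CPC" <;>
            cases hm : PySem.List.index? xs "Max Bid" <;>
              cases hd : PySem.List.index? xs "Default Bid" <;>
                simp [pvStep, pvRank_eval, Prod.ext_iff] <;> omega
      · by_cases h3 : x = "Max Bid"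
        · subst h3
          rw [PySem.List.index?_cons_of_ne _ (by decide), PySem.List.index?_cons_of_ne _ (by decide),
              PySem.List.index?_cons_self]
          cases hb : PySem.List.index? xs "Bid" <;>
            cases hc : PySem.List.index? xs "Max CPC" <;>
              cases hm : PySem.List.index? xs "Max Bid" <;>
                cases hd : PySem.List.index? xs "Default Bid" <;>
                  simp [pvStep, pvRank_eval, Prod.ext_iff] <;> omega
        · by_cases h4 : x = "Default Bid"
          · subst h4
            rw [PySem.List.index?_cons_of_ne _ (by decide), PySem.List.index?_cons_of_ne _ (by decide),
                PySem.List.index?_cons_of_ne _ (by decide), PySem.List.index?_cons_self]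
            cases hb : PySem.List.index? xs "Bid" <;>
              cases hc : PySem.List.index? xs "Max CPC" <;>
                cases hm : PySem.List.index? xs "Max Bid" <;>
                  cases hd : PySem.List.index? xs "Default Bid" <;>
                    simp [pvStep, pvRank_eval, Prod.ext_iff] <;> omega
          · rw [PySem.List.index?_cons_of_ne _ h1, PySem.List.index?_cons_of_ne _ h2,
                PySem.List.index?_cons_of_ne _ h3, PySem.List.index?_cons_of_ne _ h4]
            have h1' : ¬("Bid" = x) := fun h => h1 h.symm
            have h2' : ¬("Max CPC" = x) := fun h => h2 h.symm
            have h3' : ¬("Max Bid" = x) := fun h => h3 h.symm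
            have h4' : ¬("Default Bid" = x) := fun h => h4 h.symm
            cases hb : PySem.List.index? xs "Bid" <;>
              cases hc : PySem.List.index? xs "Max CPC" <;>
                cases hm : PySem.List.index? xs "Max Bid" <;>
                  cases hd : PySem.List.index? xs "Default Bid" <;>
                    simp [pvStep, pvRank_eval, h1', h2', h3', h4', Prod.ext_iff] <;> omega

-- ===== VERDICT (by name: the statement is the Claim_ definition above) =====
theorem get_helper_column_position_spec : Claim_equal_get_helper_column_position := by
  intro cols _
  unfold Spec_get_helper_column_position get_helper_column_position get_helper_column_position_alt
  rw [pvScan_char]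
  cases h1 : PySem.List.index? cols "Bid" <;>
    cases h2 : PySem.List.index? cols "Max CPC" <;>
      cases h3 : PySem.List.index? cols "Max Bid" <;>
        cases h4 : PySem.List.index? cols "Default Bid" <;> simp
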